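-- pv_equiv track=rewrite | github.com/andy-regulore/lofi | src/orchestration.py | optimize_spacing
-- ===== SOURCE A (Python) =====
-- from typing import Dict, List, Optional, Set, Tuple
--
-- def optimize_spacing(notes: List[int], target_register: str = "mid") -> List[int]:
--     """
--     Optimize voice spacing by octave displacement.
--
--     Args:
--         notes: MIDI note numbers
--         target_register: 'low', 'mid', or 'high'
--
--     Returns:
--         Optimized note list
--     """
--     if len(notes) < 2:
--         return notes
--
--     # Define target ranges
--     target_ranges = {"low": (36, 60), "mid": (48, 72), "high": (60, 84)}
--
--     target_low, target_high = target_ranges[target_register]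
--
--     # Normalize to pitch classes
--     pitch_classes = [note % 12 for note in notes]
--
--     # Place in target register
--     optimized = []
--     for pc in pitch_classes:
--         # Find best octave
--         best_note = pc
--         while best_note < target_low:
--             best_note += 12
--         while best_note > target_high:
--             best_note -= 12
--         optimized.append(best_note)
--
--     # Sort and check spacing
--     optimized = sorted(optimized)
--
--     # Ensure no unisons
--     final = [optimized[0]]
--     for note in optimized[1:]:
--         if note == final[-1]:
--             note += 12  # Raise by octave
--         final.append(note)
--
--     return final
-- ===== SOURCE B (Python) =====
-- def optimize_spacing(notes, target_register="mid"):
--     if len(notes) < 2: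
--         return notes
--     low = {"low": 36, "mid": 48, "high": 60}[target_register]
--     # Bucket count by pitch class relative to low (counting sort: no comparison sort needed).
--     counts = {}
--     for n in notes:
--         pc = (n - low) % 12
--         counts[pc] = counts.get(pc, 0) + 1
--     # Emit each bucket in pitch-class order; within a bucket the de-unison rule
--     # alternates v, v+12, v, v+12, ... (each raised copy frees the next for v again).
--     out = []
--     for pc in range(12):
--         v = low + pc
--         for i in range(counts.get(pc, 0)):
--             out.append(v + 12 if i % 2 == 1 else v)
--     return out
-- ===== Notes on version B (the rewrite author's own statement) =====
-- stated objective: faster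
-- what changed: Replaces A's per-note octave-shift while-loops + comparison sort + sequential de-unison pass with a 12-bucket counting sort: one pass tallies each note's pitch class in a dict, then the output is emitted bucket by bucket as the alternating v, v+12 pattern that the de-unison rule provably produces on each run of equal values.
import Mathlib
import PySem

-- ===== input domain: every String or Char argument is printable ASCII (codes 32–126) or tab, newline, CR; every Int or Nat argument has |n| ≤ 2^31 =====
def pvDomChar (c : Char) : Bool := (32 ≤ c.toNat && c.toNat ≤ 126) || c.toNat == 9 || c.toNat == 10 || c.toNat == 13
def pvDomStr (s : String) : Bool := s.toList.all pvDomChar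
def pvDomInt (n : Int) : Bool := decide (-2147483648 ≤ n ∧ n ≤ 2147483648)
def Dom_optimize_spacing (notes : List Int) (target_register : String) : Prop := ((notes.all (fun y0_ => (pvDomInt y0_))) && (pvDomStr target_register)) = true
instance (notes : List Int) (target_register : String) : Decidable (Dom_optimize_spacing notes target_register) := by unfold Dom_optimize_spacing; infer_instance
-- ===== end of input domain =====

-- B replaces A's sort-then-dedupe pipeline with a 12-bucket counting sort: count pitch classes in a dict,
-- then emit each bucket's alternating v, v+12 pattern directly (no comparison sort, no dedupe pass).


-- ===== PORT A =====
-- `while best_note < target_low: best_note += 12`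
def pvRaise12 (b low : Int) : Int :=
  if b < low then pvRaise12 (b + 12) low else b
termination_by (low - b).toNat
decreasing_by omega

-- `while best_note > target_high: best_note -= 12`
def pvLower12 (b high : Int) : Int :=
  if b > high then pvLower12 (b - 12) high else b
termination_by (b - high).toNat
decreasing_by omega

def optimize_spacing (notes : List Int) (target_register : String) : List Int :=
  if notes.length < 2 then notes
  else
    let target_ranges : List (String × (Int × Int)) :=
      [("low", (36, 60)), ("mid", (48, 72)), ("high", (60, 84))]
    match target_ranges.lookup target_register with
    | none => []  -- Python raises KeyError here; excluded by Pre_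
    | some (target_low, target_high) =>
      let pitch_classes := notes.map (fun note => PySem.Int.mod note 12)
      let optimized := pitch_classes.foldl
        (fun acc pc => acc ++ [pvLower12 (pvRaise12 pc target_low) target_high]) []
      let optimized := PySem.List.sorted optimized (fun x => x)
      match optimized with
      | [] => []  -- unreachable: notes.length ≥ 2
      | h :: t =>
        t.foldl (fun fin note =>
          fin ++ [if note == fin.getLastD 0 then note + 12 else note]) [h]

-- ===== PORT B =====
def optimize_spacing_alt (notes : List Int) (target_register : String) : List Int :=
  if notes.length < 2 then notes
  else
    match [("low", (36 : Int)), ("mid", 48), ("high", 60)].lookup target_register with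
    | none => []  -- Python raises KeyError here; excluded by Pre_
    | some low =>
      let counts := notes.foldl
        (fun d n => d.modify (PySem.Int.mod (n - low) 12) 0 (· + 1)) (PySem.Dict.empty)
      (PySem.List.pyRange 0 12 1).foldl (fun out pc =>
        let v := low + pc
        (PySem.List.pyRange 0 (counts.getD pc 0) 1).foldl
          (fun out i => out ++ [if PySem.Int.mod i 2 == 1 then v + 12 else v]) out) []

-- ===== PRECONDITION & SPEC =====
-- Pre_ excludes exactly the inputs where Python A raises KeyError: an unknown register name with ≥ 2 notes.
def Pre_optimize_spacing (notes : List Int) (target_register : String) : Prop :=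
  notes.length < 2 ∨ target_register = "low" ∨ target_register = "mid" ∨ target_register = "high"
instance (notes : List Int) (target_register : String) : Decidable (Pre_optimize_spacing notes target_register) := by
  unfold Pre_optimize_spacing; infer_instance
def pvWitness_optimize_spacing : List Int × String := ([60, 65], "mid")

def Spec_optimize_spacing (notes : List Int) (target_register : String) (out : List Int) : Prop := out = optimize_spacing_alt notes target_register
instance (notes : List Int) (target_register : String) (out : List Int) : Decidable (Spec_optimize_spacing notes target_register out) := by unfold Spec_optimize_spacing; infer_instance

-- ===== CLAIM (what is proved, stated in full; the proofs are below) =====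
def Claim_equal_optimize_spacing : Prop := ∀ (notes : List Int) (target_register : String), Dom_optimize_spacing notes target_register → Pre_optimize_spacing notes target_register → Spec_optimize_spacing notes target_register (optimize_spacing notes target_register)

-- ===== LEMMAS AND PROOFS =====

-- The de-unison fold of A.
def pvG (fin : List Int) (note : Int) : List Int :=
  fin ++ [if note == fin.getLastD 0 then note + 12 else note]

-- B's alternating bucket pattern, with a phase j.
def pvPat (j c : Nat) (v : Int) : List Int :=
  (List.range c).map (fun k => if (k + j) % 2 = 1 then v + 12 else v)

-- A's up-shift loop in closed form.
theorem pvRaise12_aux (k : Nat) : ∀ b low : Int, (low - b).toNat ≤ k →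
    pvRaise12 b low = if b < low then low + (b - low) % 12 else b := by
  induction k with
  | zero =>
    intro b low h
    have hb : ¬ b < low := by omega
    rw [pvRaise12]; simp [hb]
  | succ k ih =>
    intro b low h
    rw [pvRaise12]
    by_cases hb : b < low
    · rw [if_pos hb, ih (b + 12) low (by omega)]
      split_ifs <;> omega
    · simp [hb]

theorem pvRaise12_eq (b low : Int) :
    pvRaise12 b low = if b < low then low + (b - low) % 12 else b :=
  pvRaise12_aux (low - b).toNat b low le_rfl

theorem pvLower12_id (b high : Int) (h : ¬ b > high) : pvLower12 b high = b := by
  rw [pvLower12]; simp [h]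

-- A's per-note placement equals the canonical representative low + ((n - low) mod 12).
theorem place_eq (n low high : Int) (hlow : 12 ≤ low) (hhigh : low + 11 ≤ high) :
    pvLower12 (pvRaise12 (PySem.Int.mod n 12) low) high = low + PySem.Int.mod (n - low) 12 := by
  rw [PySem.Int.mod_eq_emod_of_pos (by norm_num), PySem.Int.mod_eq_emod_of_pos (by norm_num)]
  have h0 : 0 ≤ n % 12 := Int.emod_nonneg n (by norm_num)
  have h1 : n % 12 < 12 := Int.emod_lt_of_pos n (by norm_num)
  rw [pvRaise12_eq, if_pos (by omega)]
  have h2 : 0 ≤ (n % 12 - low) % 12 := Int.emod_nonneg _ (by norm_num)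
  have h3 : (n % 12 - low) % 12 < 12 := Int.emod_lt_of_pos _ (by norm_num)
  rw [pvLower12_id _ _ (by omega)]
  omega

-- pattern phase shifts
theorem pvPat_zero_succ (c : Nat) (v : Int) : pvPat 0 (c + 1) v = v :: pvPat 1 c v := by
  simp [pvPat, List.range_succ_eq_map, List.map_map]

theorem pvPat_one_succ (c : Nat) (v : Int) : pvPat 1 (c + 1) v = (v + 12) :: pvPat 0 c v := by
  simp only [pvPat, List.range_succ_eq_map, List.map_cons, List.map_map]
  congr 1
  exact List.map_congr_left fun k _ => by
    simp only [Function.comp_apply]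
    have h : (k + 1 + 1) % 2 = (k + 0) % 2 := by omega
    rw [h]

theorem mem_pvPat (j c : Nat) (v x : Int) (h : x ∈ pvPat j c v) : x = v ∨ x = v + 12 := by
  simp only [pvPat, List.mem_map] at h
  obtain ⟨k, -, hk⟩ := h
  split_ifs at hk <;> omega

-- folding a constant run through the de-unison pass yields the alternating pattern
theorem run_fold (c : Nat) : ∀ (v : Int) (acc : List Int),
    (acc.getLastD 0 ≠ v → (List.replicate c v).foldl pvG acc = acc ++ pvPat 0 c v) ∧
    (acc.getLastD 0 = v → (List.replicate c v).foldl pvG acc = acc ++ pvPat 1 c v) := by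
  induction c with
  | zero => intro v acc; constructor <;> intro _ <;> simp [pvPat]
  | succ c ih =>
    intro v acc
    constructor
    · intro hne
      have hb : (v == acc.getLastD 0) = false := by
        rw [beq_eq_false_iff_ne]; exact fun h => hne h.symm
      rw [List.replicate_succ, List.foldl_cons]
      show (List.replicate c v).foldl pvG (pvG acc v) = _
      have hacc : pvG acc v = acc ++ [v] := by unfold pvG; rw [hb]; simp
      rw [hacc, (ih v (acc ++ [v])).2 (by rw [List.getLastD_concat])]
      rw [pvPat_zero_succ]
      simp
    · intro heq
      have hb : (v == acc.getLastD 0) = true := by rw [beq_iff_eq]; exact heq.symm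
      rw [List.replicate_succ, List.foldl_cons]
      show (List.replicate c v).foldl pvG (pvG acc v) = _
      have hacc : pvG acc v = acc ++ [v + 12] := by unfold pvG; rw [hb]; simp
      rw [hacc, (ih v (acc ++ [v + 12])).1 (by rw [List.getLastD_concat]; omega)]
      rw [pvPat_one_succ]
      simp

theorem pvPat_ne_nil (j c : Nat) (v : Int) (hc : c ≠ 0) : pvPat j c v ≠ [] := by
  simp [pvPat]
  omega

theorem getLastD_append_ne_nil (acc l : List Int) (h : l ≠ []) :
    (acc ++ l).getLastD 0 = l.getLastD 0 := by
  rw [List.getLastD_eq_getLast?, List.getLastD_eq_getLast?, List.getLast?_append_of_ne_nil acc h]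

theorem getLastD_mem (l : List Int) (h : l ≠ []) : l.getLastD 0 ∈ l := by
  rw [List.getLastD_eq_getLast?, List.getLast?_eq_some_getLast h]
  exact List.getLast_mem h

-- the last element after emitting a nonempty bucket run is v or v + 12
theorem getLastD_append_pvPat (acc : List Int) (j c : Nat) (v : Int) (hc : c ≠ 0) :
    (acc ++ pvPat j c v).getLastD 0 = v ∨ (acc ++ pvPat j c v).getLastD 0 = v + 12 := by
  rw [getLastD_append_ne_nil acc _ (pvPat_ne_nil j c v hc)]
  exact mem_pvPat j c v _ (getLastD_mem _ (pvPat_ne_nil j c v hc))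

-- folding the remaining bucket runs, given a safe accumulator
theorem fold_groups (low : Int) (c : Int → Nat) : ∀ (ks : List Int) (acc : List Int),
    ks.Pairwise (· < ·) → (∀ k ∈ ks, 0 ≤ k ∧ k < 12) →
    (∀ k ∈ ks, acc.getLastD 0 ≠ low + k) →
    (ks.flatMap (fun k => List.replicate (c k) (low + k))).foldl pvG acc
      = acc ++ ks.flatMap (fun k => pvPat 0 (c k) (low + k)) := by
  intro ks
  induction ks with
  | nil => intro acc _ _ _; simp
  | cons k ks ih =>
    intro acc hpw hbound hsafe
    rw [List.flatMap_cons, List.foldl_append]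
    rw [(run_fold (c k) (low + k) acc).1 (hsafe k (by simp))]
    have hsafe' : ∀ k' ∈ ks, (acc ++ pvPat 0 (c k) (low + k)).getLastD 0 ≠ low + k' := by
      intro k' hk'
      by_cases hc : c k = 0
      · have : pvPat 0 (c k) (low + k) = [] := by simp [pvPat, hc]
        rw [this, List.append_nil]
        exact hsafe k' (by simp [hk'])
      · have hk12 : 0 ≤ k ∧ k < 12 := hbound k (by simp)
        have hk'12 : 0 ≤ k' ∧ k' < 12 := hbound k' (by simp [hk'])
        have hlt : k < k' := (List.pairwise_cons.mp hpw).1 k' hk'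
        rcases getLastD_append_pvPat acc 0 (c k) (low + k) hc with h | h <;> rw [h] <;> omega
    rw [ih (acc ++ pvPat 0 (c k) (low + k)) (List.pairwise_cons.mp hpw).2
        (fun k' hk' => hbound k' (by simp [hk'])) hsafe']
    rw [List.flatMap_cons, List.append_assoc]

-- the whole de-unison pass over the concatenated buckets
theorem main_fold (low : Int) (c : Int → Nat) : ∀ (ks : List Int),
    ks.Pairwise (· < ·) → (∀ k ∈ ks, 0 ≤ k ∧ k < 12) →
    (match ks.flatMap (fun k => List.replicate (c k) (low + k)) with
     | [] => ([] : List Int)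
     | h :: t => t.foldl pvG [h])
      = ks.flatMap (fun k => pvPat 0 (c k) (low + k)) := by
  intro ks
  induction ks with
  | nil => simp
  | cons k ks ih =>
    intro hpw hbound
    rw [List.flatMap_cons, List.flatMap_cons]
    cases hc : c k with
    | zero =>
      have h1 : List.replicate 0 (low + k) = ([] : List Int) := rfl
      have h2 : pvPat 0 0 (low + k) = [] := rfl
      rw [h1, h2, List.nil_append, List.nil_append]
      exact ih (List.pairwise_cons.mp hpw).2 (fun k' hk' => hbound k' (by simp [hk']))
    | succ m =>
      rw [List.replicate_succ, List.cons_append]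
      show (List.replicate m (low + k) ++ ks.flatMap fun k => List.replicate (c k) (low + k)).foldl
          pvG [low + k] = _
      rw [List.foldl_append]
      rw [(run_fold m (low + k) [low + k]).2 rfl]
      have hacc : [low + k] ++ pvPat 1 m (low + k) = pvPat 0 (m + 1) (low + k) := by
        rw [pvPat_zero_succ]; rfl
      rw [hacc]
      have hsafe : ∀ k' ∈ ks, (pvPat 0 (m + 1) (low + k)).getLastD 0 ≠ low + k' := by
        intro k' hk'
        have hk12 : 0 ≤ k ∧ k < 12 := hbound k (by simp)
        have hk'12 : 0 ≤ k' ∧ k' < 12 := hbound k' (by simp [hk'])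
        have hlt : k < k' := (List.pairwise_cons.mp hpw).1 k' hk'
        have := getLastD_append_pvPat [] 0 (m + 1) (low + k) (Nat.succ_ne_zero m)
        rw [List.nil_append] at this
        rcases this with h | h <;> rw [h] <;> omega
      rw [fold_groups low c ks (pvPat 0 (m + 1) (low + k)) (List.pairwise_cons.mp hpw).2
          (fun k' hk' => hbound k' (by simp [hk'])) hsafe]

-- counting elements of the concatenated bucket runs
theorem count_groups (low m : Int) (c : Int → Nat) : ∀ ks : List Int, ks.Nodup →
    (ks.flatMap (fun k => List.replicate (c k) (low + k))).count m
      = if m - low ∈ ks then c (m - low) else 0 := by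
  intro ks
  induction ks with
  | nil => simp
  | cons k ks ih =>
    intro hnd
    rw [List.flatMap_cons, List.count_append, List.count_replicate, ih hnd.of_cons]
    by_cases hk : k = m - low
    · have h1 : (low + k == m) = true := by rw [beq_iff_eq]; omega
      have h2 : m - low ∉ ks := hk ▸ (List.nodup_cons.mp hnd).1
      have h3 : m - low ∈ k :: ks := by rw [← hk]; exact List.mem_cons_self
      simp [h1, ← hk]
      exact fun h => absurd (hk ▸ h : m - low ∈ ks) h2
    · have h1 : (low + k == m) = false := by rw [beq_eq_false_iff_ne]; omega
      have h2 : (m - low ∈ k :: ks) ↔ (m - low ∈ ks) := by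
        simp only [List.mem_cons]
        exact ⟨fun h => h.elim (fun h => absurd h.symm hk) id, Or.inr⟩
      simp [h1, h2]

-- the concatenated bucket runs are weakly increasing
theorem pairwise_groups (low : Int) (c : Int → Nat) : ∀ ks : List Int, ks.Pairwise (· < ·) →
    (ks.flatMap (fun k => List.replicate (c k) (low + k))).Pairwise (· ≤ ·) := by
  intro ks
  induction ks with
  | nil => simp
  | cons k ks ih =>
    intro hpw
    rw [List.flatMap_cons, List.pairwise_append]
    refine ⟨List.pairwise_replicate.mpr (Or.inr le_rfl), ih (List.pairwise_cons.mp hpw).2, ?_⟩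
    intro a ha b hb
    obtain rfl := List.eq_of_mem_replicate ha
    obtain ⟨k', hk', hb'⟩ := List.mem_flatMap.mp hb
    obtain rfl := List.eq_of_mem_replicate hb'
    have := (List.pairwise_cons.mp hpw).1 k' hk'
    omega

-- the sorted placed list IS the concatenation of the 12 bucket runs
theorem sorted_eq_groups (low : Int) (pcs : List Int) (hpcs : ∀ p ∈ pcs, 0 ≤ p ∧ p < 12) :
    PySem.List.sorted (pcs.map (fun p => low + p)) (fun x => x)
      = (PySem.List.pyRange 0 12 1).flatMap
          (fun k => List.replicate (pcs.count k) (low + k)) := by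
  apply PySem.List.sorted_id_eq_of_perm_of_pairwise
  · rw [List.perm_iff_count]
    intro m
    rw [count_groups low m (fun k => pcs.count k) _ (PySem.List.nodup_pyRange_one 0 12)]
    have hinj : Function.Injective (fun p : Int => low + p) := fun a b h => by
      simpa using h
    have hcnt : (pcs.map (fun p => low + p)).count m = pcs.count (m - low) := by
      have := List.count_map_of_injective pcs (fun p => low + p) hinj (m - low)
      simpa [show low + (m - low) = m by omega] using this
    simp only [PySem.List.mem_pyRange_one]
    by_cases hm : 0 ≤ m - low ∧ m - low < 12
    · rw [if_pos hm, hcnt]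
    · rw [if_neg hm, hcnt]
      refine (List.count_eq_zero.mpr ?_).symm
      intro hmem
      exact hm (hpcs _ hmem)
  · exact pairwise_groups low (fun k => pcs.count k) _ (PySem.List.pairwise_lt_pyRange_one 0 12)

-- A's whole pipeline after the register lookup equals B's
theorem core_eq (notes : List Int) (low high : Int)
    (hlow : 12 ≤ low) (hhigh : low + 11 ≤ high) :
    (match PySem.List.sorted
        ((notes.map (fun note => PySem.Int.mod note 12)).foldl
          (fun acc pc => acc ++ [pvLower12 (pvRaise12 pc low) high]) []) (fun x => x) with
     | [] => ([] : List Int)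
     | h :: t =>
       t.foldl (fun fin note =>
         fin ++ [if note == fin.getLastD 0 then note + 12 else note]) [h])
    = (PySem.List.pyRange 0 12 1).foldl (fun out pc =>
        let v := low + pc
        (PySem.List.pyRange 0
            ((notes.foldl (fun d n => d.modify (PySem.Int.mod (n - low) 12) 0 (· + 1))
              (PySem.Dict.empty)).getD pc 0) 1).foldl
          (fun out i => out ++ [if PySem.Int.mod i 2 == 1 then v + 12 else v]) out) [] := by
  have hbounds : ∀ p ∈ notes.map (fun n => PySem.Int.mod (n - low) 12), 0 ≤ p ∧ p < 12 := by
    intro p hp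
    simp only [List.mem_map] at hp
    obtain ⟨n, -, rfl⟩ := hp
    exact ⟨PySem.Int.mod_nonneg _ (by norm_num), PySem.Int.mod_lt _ (by norm_num)⟩
  -- A's placement loop is the map of the closed-form placement
  rw [PySem.List.foldl_append_singleton_eq_map, List.nil_append, List.map_map]
  have hplace : notes.map ((fun pc => pvLower12 (pvRaise12 pc low) high) ∘ (fun note => PySem.Int.mod note 12))
      = (notes.map (fun n => PySem.Int.mod (n - low) 12)).map (fun p => low + p) := by
    rw [List.map_map]
    exact List.map_congr_left (fun n _ => place_eq n low high hlow hhigh)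
  rw [hplace, sorted_eq_groups low _ hbounds]
  -- A's de-unison pass over the bucket runs
  have hmain := main_fold low (fun k => (notes.map (fun n => PySem.Int.mod (n - low) 12)).count k)
      (PySem.List.pyRange 0 12 1) (PySem.List.pairwise_lt_pyRange_one 0 12)
      (fun k hk => PySem.List.mem_pyRange_one.mp hk)
  have hG : (fun fin note => fin ++ [if note == fin.getLastD 0 then note + 12 else note]) = pvG := rfl
  rw [hG, hmain]
  -- B's counter dict counts the pitch classes
  have hgetD : ∀ pc : Int,
      (notes.foldl (fun d n => d.modify (PySem.Int.mod (n - low) 12) 0 (· + 1))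
        PySem.Dict.empty).getD pc 0
      = (((notes.map (fun n => PySem.Int.mod (n - low) 12)).count pc : Nat) : Int) := by
    intro pc
    have h := PySem.Dict.getD_foldl_modify_add_one
      (notes.map (fun n => PySem.Int.mod (n - low) 12)) PySem.Dict.empty pc
    rw [List.foldl_map] at h
    rw [h, PySem.Dict.getD_empty, zero_add]
  simp only [hgetD]
  -- B's nested emission loops are the concatenation of the bucket patterns
  simp only [PySem.List.foldl_append_singleton_eq_map]
  rw [PySem.List.foldl_append_eq_flatMap, List.nil_append]
  apply List.flatMap_congr
  intro pc _
  rw [PySem.List.pyRange_zero_nat, List.map_map]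
  apply List.map_congr_left
  intro k _
  simp only [Function.comp_apply]
  have h2 : PySem.Int.mod (k : Int) 2 = ((k % 2 : Nat) : Int) := by
    exact_mod_cast PySem.Int.mod_natCast k 2
  rw [h2]
  by_cases h : k % 2 = 1
  · simp [h]
  · have h0 : k % 2 = 0 := by omega
    simp [h0]

-- ===== VERDICT (by name: the statement is the Claim_ definition above) =====
theorem optimize_spacing_spec : Claim_equal_optimize_spacing := by
  unfold Claim_equal_optimize_spacing
  intro notes tr _hdom hpre
  unfold Spec_optimize_spacing optimize_spacing optimize_spacing_alt
  by_cases hlen : notes.length < 2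
  · simp [hlen]
  · simp only [if_neg hlen]
    rcases hpre with h | h | h | h
    · exact absurd h hlen
    · subst h
      have hl : [("low", ((36 : Int), (60 : Int))), ("mid", (48, 72)), ("high", (60, 84))].lookup "low" = some (36, 60) := rfl
      have hl' : [("low", (36 : Int)), ("mid", 48), ("high", 60)].lookup "low" = some 36 := rfl
      simp only [hl, hl']
      exact core_eq notes 36 60 (by norm_num) (by norm_num)
    · subst h
      have hl : [("low", ((36 : Int), (60 : Int))), ("mid", (48, 72)), ("high", (60, 84))].lookup "mid" = some (48, 72) := rfl
      have hl' : [("low", (36 : Int)), ("mid", 48), ("high", 60)].lookup "mid" = some 48 := rfl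
      simp only [hl, hl']
      exact core_eq notes 48 72 (by norm_num) (by norm_num)
    · subst h
      have hl : [("low", ((36 : Int), (60 : Int))), ("mid", (48, 72)), ("high", (60, 84))].lookup "high" = some (60, 84) := rfl
      have hl' : [("low", (36 : Int)), ("mid", 48), ("high", 60)].lookup "high" = some 60 := rfl
      simp only [hl, hl']
      exact core_eq notes 60 84 (by norm_num) (by norm_num)
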